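-- pv_equiv track=rewrite | github.com/faith-wm/NLP-100-bootcamp | warm_up_string_manipulation.py | typoglycemia
-- ===== SOURCE A (Python) =====
-- def typoglycemia(text):
--     words=text.split(' ')
--     output=[]
--     for w in words:
--         if len(w)<=4:
--             output.append(w)
--         else:
--             new_w=w[0]+w[len(w)-1:0:-1]+w[-1]
--             output.append(new_w)
--     return ' '.join(output)
-- ===== SOURCE B (Python) =====
-- def typoglycemia(text):
--     def scramble(w):
--         if len(w) <= 4:
--             return w
--         return w[0] + w[1:][::-1] + w[-1]
--
--     out = ''
--     cur = ''
--     for ch in text: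
--         if ch == ' ':
--             out += scramble(cur) + ' '
--             cur = ''
--         else:
--             cur += ch
--     return out + scramble(cur)
-- ===== Notes on version B (the rewrite author's own statement) =====
-- stated objective: alternative
-- what changed: B replaces A's split/list-accumulator/join pipeline with a single left-to-right character pass that builds the output string directly, flushing and scrambling the pending word whenever a space separator is reached.
import Mathlib
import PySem

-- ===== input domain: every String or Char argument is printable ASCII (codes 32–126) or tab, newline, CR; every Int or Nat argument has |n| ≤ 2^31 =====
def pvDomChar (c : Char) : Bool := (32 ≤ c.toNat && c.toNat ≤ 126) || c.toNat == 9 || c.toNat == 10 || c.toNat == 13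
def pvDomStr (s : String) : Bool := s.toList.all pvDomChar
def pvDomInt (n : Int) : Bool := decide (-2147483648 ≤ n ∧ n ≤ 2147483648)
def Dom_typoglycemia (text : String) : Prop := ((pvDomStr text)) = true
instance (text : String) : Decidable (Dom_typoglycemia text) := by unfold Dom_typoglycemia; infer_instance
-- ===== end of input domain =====

-- B replaces split(' ')/list-accumulator/join with a single character pass that flushes each word at a space (objective: alternative, same cost).

-- ===== PORT A =====
-- the loop body: w if len(w)<=4 else w[0]+w[len(w)-1:0:-1]+w[-1]
-- (the pyGet?/slice? options cannot be none in the else branch since len(w) > 4; .elim/.getD only removes the Option)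
def typoA_word (w : List Char) : List Char :=
  if w.length ≤ 4 then w
  else ((PySem.List.pyGet? w 0).elim [] (fun c => [c]))
       ++ ((PySem.List.slice? w (some ((w.length : Int) - 1)) (some 0) (-1)).getD [])
       ++ ((PySem.List.pyGet? w (-1)).elim [] (fun c => [c]))

def typoglycemia (text : String) : String :=
  let words := PySem.Chars.splitOn text.toList [' ']
  let output := words.foldl (fun out w => out ++ [typoA_word w]) []
  String.ofList (PySem.Chars.join [' '] output)

-- ===== PORT B =====
-- scramble(w): w if len(w)<=4 else w[0] + w[1:][::-1] + w[-1]
def scrambleB (w : List Char) : List Char :=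
  if w.length ≤ 4 then w
  else ((PySem.List.pyGet? w 0).elim [] (fun c => [c]))
       ++ ((PySem.List.slice? (PySem.List.slice w (some 1) none) none none (-1)).getD [])
       ++ ((PySem.List.pyGet? w (-1)).elim [] (fun c => [c]))

-- loop body: on ' ' flush 'out += scramble(cur) + " "; cur = ""', else 'cur += ch'
def stepB (st : List Char × List Char) (ch : Char) : List Char × List Char :=
  if ch = ' ' then (st.1 ++ scrambleB st.2 ++ [' '], []) else (st.1, st.2 ++ [ch])

def typoglycemia_alt (text : String) : String :=
  let fin := text.toList.foldl stepB ([], [])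
  String.ofList (fin.1 ++ scrambleB fin.2)

-- ===== PRECONDITION & SPEC =====
def Spec_typoglycemia (text : String) (out : String) : Prop := out = typoglycemia_alt text
instance (text : String) (out : String) : Decidable (Spec_typoglycemia text out) := by unfold Spec_typoglycemia; infer_instance

-- ===== CLAIM (what is proved, stated in full; the proofs are below) =====
def Claim_equal_typoglycemia : Prop := ∀ (text : String), Dom_typoglycemia text → Spec_typoglycemia text (typoglycemia text)

-- ===== LEMMAS AND PROOFS =====

-- proof-side model of split(' ') : prepend a word fragment to the first piece
def consHead (w : List Char) : List (List Char) → List (List Char)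
  | [] => [w]
  | p :: ps => (w ++ p) :: ps

def splitSp : List Char → List (List Char)
  | [] => [[]]
  | c :: cs => if c = ' ' then [] :: splitSp cs else consHead [c] (splitSp cs)

lemma consHead_ne_nil (w : List Char) (ps : List (List Char)) : consHead w ps ≠ [] := by
  cases ps <;> simp [consHead]

lemma splitSp_ne_nil (cs : List Char) : splitSp cs ≠ [] := by
  cases cs with
  | nil => simp [splitSp]
  | cons c cs => by_cases h : c = ' ' <;> simp [splitSp, h, consHead_ne_nil]

lemma consHead_nil_of_ne (ps : List (List Char)) (h : ps ≠ []) : consHead [] ps = ps := by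
  cases ps with
  | nil => exact absurd rfl h
  | cons p t => simp [consHead]

lemma consHead_assoc (u v : List Char) (ps : List (List Char)) :
    consHead (u ++ v) ps = consHead u (consHead v ps) := by
  cases ps <;> simp [consHead]

-- the fuel-based splitOn.go at separator [' '] computes consHead cur.reverse (splitSp l)
lemma goSpec : ∀ (fuel : Nat) (l cur : List Char) (acc : List (List Char)),
    l.length < fuel →
    PySem.Chars.splitOn.go [' '] fuel l cur acc = acc.reverse ++ consHead cur.reverse (splitSp l) := by
  intro fuel
  induction fuel with
  | zero => intro l cur acc h; omega
  | succ f ih =>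
    intro l cur acc h
    cases l with
    | nil =>
      rw [PySem.Chars.splitOn.go.eq_def]
      simp [splitSp, consHead]
    | cons c rest =>
      rw [PySem.Chars.splitOn.go.eq_def]
      simp only [List.isPrefixOf, Bool.and_true]
      by_cases hc : c = ' '
      · simp only [hc, beq_self_eq_true, if_pos]
        have hd : List.drop [' '].length (' ' :: rest) = rest := by simp
        rw [hd, ih rest [] (List.reverse cur :: acc) (by simpa using Nat.lt_of_succ_lt_succ h)]
        rw [List.reverse_nil, consHead_nil_of_ne _ (splitSp_ne_nil rest)]
        simp [splitSp, consHead]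
      · have hne : ¬ ((' ' == c) = true) := by
          simp only [beq_iff_eq]; intro h'; exact hc h'.symm
        rw [if_neg hne]
        rw [ih rest (c :: cur) acc (by simpa using Nat.lt_of_succ_lt_succ h)]
        have : List.reverse (c :: cur) = cur.reverse ++ [c] := by simp
        rw [this, consHead_assoc]
        simp [splitSp, hc]

lemma splitOn_eq_splitSp (cs : List Char) : PySem.Chars.splitOn cs [' '] = splitSp cs := by
  unfold PySem.Chars.splitOn
  rw [goSpec (cs.length + 1) cs [] [] (by omega)]
  simpa using consHead_nil_of_ne _ (splitSp_ne_nil cs)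

-- A's accumulator loop is a map
lemma foldl_append_singleton (f : List Char → List Char) :
    ∀ (ws : List (List Char)) (acc : List (List Char)),
      List.foldl (fun out w => out ++ [f w]) acc ws = acc ++ ws.map f := by
  intro ws
  induction ws with
  | nil => simp
  | cons w t ih => intro acc; simp [ih]

-- descending-index slice segment: w[s-cnt+1 .. s] reversed
lemma rev_seg (w : List Char) (s : Nat) (hs : s < w.length) :
    ∀ (cnt : Nat), cnt ≤ s + 1 →
      (List.range cnt).filterMap (fun (k : Nat) => w[((s : Int) - (k : Int)).toNat]?)
        = (((w.take (s + 1)).drop (s + 1 - cnt))).reverse := by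
  intro cnt
  induction cnt with
  | zero => intro _; simp
  | succ m ih =>
    intro hm
    rw [List.range_succ, List.filterMap_append, ih (by omega)]
    have hidx : (((s : Int)) - (m : Int)).toNat = s - m := by omega
    have hlt : s - m < w.length := by omega
    have hone : (List.filterMap (fun (k : Nat) => w[((s : Int) - (k : Int)).toNat]?) [m])
        = [w[s - m]] := by
      simp [List.getElem?_eq_getElem hlt]
    rw [hone]
    have hdrop : (w.take (s + 1)).drop (s + 1 - (m + 1))
        = w[s - m] :: (w.take (s + 1)).drop (s + 1 - m) := by
      have h1 : s + 1 - (m + 1) = s - m := by omega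
      have h2 : s - m < (w.take (s + 1)).length := by
        simp [List.length_take]; omega
      rw [h1, List.drop_eq_getElem_cons h2]
      congr 1
      · simp [List.getElem_take]
      · congr 1; omega
    rw [hdrop]
    simp

-- w[len(w)-1:0:-1] = reverse of w.drop 1  (for nonempty w)
lemma slice_rev_interior (w : List Char) (h : 1 ≤ w.length) :
    PySem.List.slice? w (some ((w.length : Int) - 1)) (some 0) (-1) = some ((w.drop 1).reverse) := by
  have hstep : (-1 : Int) ≠ 0 := by decide
  unfold PySem.List.slice? PySem.List.sliceIndices
  simp only [if_neg hstep]
  rcases eq_or_lt_of_le h with h1 | h2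
  · -- length 1 : empty slice
    have hn : w.length = 1 := h1.symm
    simp only [hn]
    norm_num
    cases w with
    | nil => rfl
    | cons a t => cases t with
      | nil => rfl
      | cons b u => simp at hn
  · -- length ≥ 2
    have hlow : ¬ ((w.length : Int) - 1 < 0) := by omega
    have hs : min ((w.length : Int) - 1) ((w.length : Int) - 1) = (w.length : Int) - 1 := by omega
    have hstop : min (0 : Int) ((w.length : Int) - 1) = 0 := by omega
    simp only [show ((-1 : Int) < 0) = True by simp, if_true, if_neg hlow,
      show ¬ ((0 : Int) < -1) by decide, if_false, show ¬ ((0 : Int) < 0) by decide, hs, hstop]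
    have hcmp : (0 : Int) < (w.length : Int) - 1 := by omega
    rw [if_pos hcmp]
    have hcount : (((w.length : Int) - 1 - 0 + - -1 - 1) / - -1).toNat = w.length - 1 := by
      have : ((w.length : Int) - 1 - 0 + - -1 - 1) / - -1 = (w.length : Int) - 1 := by
        norm_num
      rw [this]; omega
    rw [hcount]
    congr 1
    have hfun : (fun (k : Nat) => w[(((w.length : Int) - 1) + (-1) * (k : Int)).toNat]?)
        = (fun (k : Nat) => w[(((w.length - 1 : Nat) : Int) - (k : Int)).toNat]?) := by
      funext k; congr 1; omega
    have hrs := rev_seg w (w.length - 1) (by omega) (w.length - 1) (by omega)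
    rw [show w.length - 1 + 1 = w.length from by omega] at hrs
    rw [show w.length - (w.length - 1) = 1 from by omega, List.take_length] at hrs
    calc (List.range (w.length - 1)).filterMap
            (fun (k : Nat) => w[(((w.length : Int) - 1) + (-1) * (k : Int)).toNat]?)
        = (List.range (w.length - 1)).filterMap
            (fun (k : Nat) => w[(((w.length - 1 : Nat) : Int) - (k : Int)).toNat]?) := by rw [hfun]
      _ = (w.drop 1).reverse := hrs

-- the two per-word transforms agree
lemma word_eq (w : List Char) : typoA_word w = scrambleB w := by
  unfold typoA_word scrambleB
  by_cases h : w.length ≤ 4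
  · simp [h]
  · rw [if_neg h, if_neg h]
    congr 2
    rw [slice_rev_interior w (by omega), PySem.List.slice_from_one,
      PySem.List.slice?_none_none_neg_one]
    simp [List.drop_one]

-- join over a cons with nonempty tail
lemma join_cons_ne (a : List Char) (ps : List (List Char)) (h : ps ≠ []) :
    PySem.Chars.join [' '] (a :: ps) = a ++ [' '] ++ PySem.Chars.join [' '] ps := by
  cases ps with
  | nil => exact absurd rfl h
  | cons p t => rw [PySem.Chars.join_cons_cons]

-- B's single pass computes A's split/map/join
lemma fold_spec : ∀ (cs out cur : List Char),
    (cs.foldl stepB (out, cur)).1 ++ scrambleB (cs.foldl stepB (out, cur)).2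
      = out ++ PySem.Chars.join [' '] ((consHead cur (splitSp cs)).map scrambleB) := by
  intro cs
  induction cs with
  | nil =>
    intro out cur
    simp [splitSp, consHead, PySem.Chars.join_singleton]
  | cons c rest ih =>
    intro out cur
    by_cases hc : c = ' '
    · have hstep : stepB (out, cur) c = (out ++ scrambleB cur ++ [' '], []) := by
        simp [stepB, hc]
      rw [List.foldl_cons, hstep, ih]
      rw [show splitSp (c :: rest) = [] :: splitSp rest by simp [splitSp, hc]]
      rw [show consHead cur ([] :: splitSp rest) = cur :: splitSp rest by simp [consHead]]
      rw [consHead_nil_of_ne _ (splitSp_ne_nil rest)]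
      rw [List.map_cons, join_cons_ne _ _ (by simp [splitSp_ne_nil rest])]
      simp
    · have hstep : stepB (out, cur) c = (out, cur ++ [c]) := by simp [stepB, hc]
      rw [List.foldl_cons, hstep, ih]
      rw [show splitSp (c :: rest) = consHead [c] (splitSp rest) by simp [splitSp, hc]]
      rw [← consHead_assoc]

-- ===== VERDICT (by name: the statement is the Claim_ definition above) =====
theorem typoglycemia_spec : Claim_equal_typoglycemia := by
  intro text _
  simp only [Spec_typoglycemia, typoglycemia, typoglycemia_alt]
  rw [splitOn_eq_splitSp, foldl_append_singleton]
  rw [show (List.map typoA_word (splitSp text.toList))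
        = List.map scrambleB (splitSp text.toList) from List.map_congr_left (fun w _ => word_eq w)]
  have := fold_spec text.toList [] []
  simp only [List.nil_append] at this ⊢
  rw [this, consHead_nil_of_ne _ (splitSp_ne_nil text.toList)]
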